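-- pv_equiv track=rewrite | github.com/sivalingam-s/Compiler-Coursework | Homework 02/HW02_lvn.py | last_writes
-- ===== SOURCE A (Python) =====
-- def last_writes(instrs):
--     out = [False] * len(instrs)
--     seen = set()
--     for idx, instr in reversed(list(enumerate(instrs))):
--         if 'dest' in instr:
--             dest = instr['dest']
--             if dest not in seen:
--                 out[idx] = True
--                 seen.add(dest)
--     return out
-- ===== SOURCE B (Python) =====
-- def last_writes(instrs):
--     last_idx = {}
--     for i, instr in enumerate(instrs):
--         if 'dest' in instr:
--             last_idx[instr['dest']] = i
--     return ['dest' in instr and last_idx[instr['dest']] == i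
--             for i, instr in enumerate(instrs)]
-- ===== Notes on version B (the rewrite author's own statement) =====
-- stated objective: alternative
-- what changed: A's single reverse scan with a seen-set is replaced by two forward passes: build a dict mapping each dest to its last write index, then mark position i iff it is that recorded last index.
import Mathlib
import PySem

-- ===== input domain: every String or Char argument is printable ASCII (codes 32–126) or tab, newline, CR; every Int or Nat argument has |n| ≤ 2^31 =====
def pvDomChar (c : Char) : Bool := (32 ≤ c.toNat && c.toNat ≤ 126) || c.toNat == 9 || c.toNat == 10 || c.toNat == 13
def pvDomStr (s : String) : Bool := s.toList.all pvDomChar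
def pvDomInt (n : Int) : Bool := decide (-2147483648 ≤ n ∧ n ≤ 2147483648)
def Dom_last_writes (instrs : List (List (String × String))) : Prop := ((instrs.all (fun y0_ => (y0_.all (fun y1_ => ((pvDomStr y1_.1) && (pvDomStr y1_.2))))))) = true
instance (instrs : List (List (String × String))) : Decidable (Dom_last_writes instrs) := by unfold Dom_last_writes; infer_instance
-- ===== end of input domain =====

-- B replaces A's single reverse scan with a seen-set by two forward passes: build a dict of each
-- dest's last write index, then mark position i iff it is that last index ("alternative" objective).

-- shared primitive: an instruction's 'dest' lookup ('dest' in instr / instr['dest'];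
-- the instruction dict is the Python dict built from the pair list, exact via Dict.ofList)
def lwDest (instr : List (String × String)) : Option String :=
  (PySem.Dict.ofList instr).get? "dest"

-- ===== PORT A =====
-- one step of A's reverse loop body (idx is from enumerate, always in range, so pySetD is exact)
def lwStepA (st : List Bool × PySem.Set String) (p : Int × List (String × String)) :
    List Bool × PySem.Set String :=
  match lwDest p.2 with
  | some dest => if st.2.contains dest then st else (PySem.List.pySetD st.1 p.1 true, st.2.add dest)
  | none => st

def last_writes (instrs : List (List (String × String))) : List Bool :=
  ((PySem.List.enumerate instrs 0).reverse.foldl lwStepA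
    (List.replicate instrs.length false, (PySem.Set.empty : PySem.Set String))).1

-- ===== PORT B =====
-- pass 1 step: record the (later-overwriting) write index for a dest
def lwUpd (t : PySem.Dict String Int) (p : Int × List (String × String)) : PySem.Dict String Int :=
  match lwDest p.2 with
  | some dest => t.insert dest p.1
  | none => t

def last_writes_alt (instrs : List (List (String × String))) : List Bool :=
  let tbl := (PySem.List.enumerate instrs 0).foldl lwUpd PySem.Dict.empty
  (PySem.List.enumerate instrs 0).map (fun p =>
    match lwDest p.2 with
    | some dest => tbl.get? dest == some p.1   -- last_idx[instr['dest']] == i (key always present)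
    | none => false)

-- ===== PRECONDITION & SPEC =====
def Spec_last_writes (instrs : List (List (String × String))) (out : List Bool) : Prop := out = last_writes_alt instrs
instance (instrs : List (List (String × String))) (out : List Bool) : Decidable (Spec_last_writes instrs out) := by unfold Spec_last_writes; infer_instance

-- ===== CLAIM (what is proved, stated in full; the proofs are below) =====
def Claim_equal_last_writes : Prop := ∀ (instrs : List (List (String × String))), Dom_last_writes instrs → Spec_last_writes instrs (last_writes instrs)

-- ===== LEMMAS AND PROOFS =====

def lastIdx : List (List (String × String)) → String → Option Nat
  | [], _ => none
  | x :: xs, d =>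
    match lastIdx xs d with
    | some i => some (i + 1)
    | none => if lwDest x = some d then some 0 else none

theorem lastIdx_cons_some {x : List (String × String)} {xs : List (List (String × String))}
    {d : String} {i : Nat} (h : lastIdx xs d = some i) : lastIdx (x :: xs) d = some (i + 1) := by
  unfold lastIdx; simp [h]

theorem lastIdx_cons_isSome (x : List (String × String)) (xs : List (List (String × String)))
    (d : String) :
    (lastIdx (x :: xs) d).isSome = true ↔ (lastIdx xs d).isSome = true ∨ lwDest x = some d := by
  rw [lastIdx]
  cases h : lastIdx xs d <;> by_cases hd : lwDest x = some d <;> simp [*]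

theorem P_shift (x : List (String × String)) (xs : List (List (String × String)))
    (k : Int) (hk : 0 ≤ k) (s0 : PySem.Set String) (j : Nat)
    (hx : lwDest x = none ∨
      ∃ d0, lwDest x = some d0 ∧ (s0.contains d0 = true ∨ (lastIdx xs d0).isSome = true)) :
    (∃ d i, lastIdx (x :: xs) d = some i ∧ j = k.toNat + i ∧ s0.contains d = false) ↔
      (∃ d i, lastIdx xs d = some i ∧ j = (k + 1).toNat + i ∧ s0.contains d = false) := by
  constructor
  · rintro ⟨d, i, h1, h2, h3⟩
    unfold lastIdx at h1
    cases hxs : lastIdx xs d with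
    | some i' =>
      rw [hxs] at h1
      exact ⟨d, i', hxs, by simp at h1; omega, h3⟩
    | none =>
      rw [hxs] at h1
      split_ifs at h1 with hd
      rcases hx with hx | ⟨d0, hd0, hseen⟩
      · rw [hx] at hd; cases hd
      · rw [hd0] at hd
        cases Option.some.inj hd
        rcases hseen with hs | hs
        · rw [h3] at hs; cases hs
        · rw [hxs] at hs; cases hs
  · rintro ⟨d, i, h1, h2, h3⟩
    exact ⟨d, i + 1, lastIdx_cons_some h1, by omega, h3⟩

theorem P_shift_new (x : List (String × String)) (xs : List (List (String × String)))
    (k : Int) (hk : 0 ≤ k) (s0 : PySem.Set String) (j : Nat) (d0 : String)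
    (hx : lwDest x = some d0) (hn : lastIdx xs d0 = none) :
    (∃ d i, lastIdx (x :: xs) d = some i ∧ j = k.toNat + i ∧ s0.contains d = false) ↔
      ((∃ d i, lastIdx xs d = some i ∧ j = (k + 1).toNat + i ∧ s0.contains d = false) ∨
        (j = k.toNat ∧ s0.contains d0 = false)) := by
  constructor
  · rintro ⟨d, i, h1, h2, h3⟩
    unfold lastIdx at h1
    cases hxs : lastIdx xs d with
    | some i' =>
      rw [hxs] at h1
      exact Or.inl ⟨d, i', hxs, by simp at h1; omega, h3⟩
    | none =>
      rw [hxs] at h1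
      split_ifs at h1 with hd
      rw [hx] at hd
      cases Option.some.inj hd
      simp at h1
      right
      exact ⟨by omega, h3⟩
  · rintro (⟨d, i, h1, h2, h3⟩ | ⟨h1, h2⟩)
    · exact ⟨d, i + 1, lastIdx_cons_some h1, by omega, h3⟩
    · refine ⟨d0, 0, ?_, by omega, h2⟩
      unfold lastIdx; simp [hn, hx]

theorem runA_inv (xs : List (List (String × String))) (k : Int)
    (st : List Bool × PySem.Set String) (hk : 0 ≤ k)
    (hlen : k.toNat + xs.length ≤ st.1.length) :
    ((PySem.List.enumerate xs k).reverse.foldl lwStepA st).1.length = st.1.length ∧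
    (∀ d : String, ((PySem.List.enumerate xs k).reverse.foldl lwStepA st).2.contains d = true ↔
        st.2.contains d = true ∨ (lastIdx xs d).isSome = true) ∧
    (∀ j : Nat,
      ((∃ d i, lastIdx xs d = some i ∧ j = k.toNat + i ∧ st.2.contains d = false) →
        ((PySem.List.enumerate xs k).reverse.foldl lwStepA st).1[j]? = some true) ∧
      ((¬ ∃ d i, lastIdx xs d = some i ∧ j = k.toNat + i ∧ st.2.contains d = false) →
        ((PySem.List.enumerate xs k).reverse.foldl lwStepA st).1[j]? = st.1[j]?)) := by
  induction xs generalizing k st with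
  | nil =>
    refine ⟨rfl, by simp [lastIdx], fun j => ⟨?_, fun _ => rfl⟩⟩
    rintro ⟨d, i, h1, -, -⟩
    simp [lastIdx] at h1
  | cons x xs ih =>
    have hfold : (PySem.List.enumerate (x :: xs) k).reverse.foldl lwStepA st
        = lwStepA ((PySem.List.enumerate xs (k + 1)).reverse.foldl lwStepA st) (k, x) := by
      rw [PySem.List.enumerate_cons, List.reverse_cons, List.foldl_append, List.foldl_cons,
        List.foldl_nil]
    obtain ⟨ihlen, ihseen, ihout⟩ := ih (k + 1) st (by omega) (by simp only [List.length_cons] at hlen; omega)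
    set r := (PySem.List.enumerate xs (k + 1)).reverse.foldl lwStepA st with hr
    rw [hfold]
    cases hx : lwDest x with
    | none =>
      have hstep : lwStepA r (k, x) = r := by simp [lwStepA, hx]
      rw [hstep]
      refine ⟨ihlen, fun d => ?_, fun j => ?_⟩
      · rw [ihseen d, lastIdx_cons_isSome]
        constructor
        · rintro (h | h) <;> [exact Or.inl h; exact Or.inr (Or.inl h)]
        · rintro (h | h | h)
          · exact Or.inl h
          · exact Or.inr h
          · rw [hx] at h; cases h
      · rw [P_shift x xs k hk st.2 j (Or.inl hx)]
        exact ihout j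
    | some d0 =>
      by_cases hs : r.2.contains d0 = true
      · have hmem : d0 ∈ r.2 := by
          have := hs; simp only [PySem.Set.contains_iff] at this; exact this
        have hstep : lwStepA r (k, x) = r := by simp [lwStepA, hx, hmem]
        rw [hstep]
        have hseen0 : st.2.contains d0 = true ∨ (lastIdx xs d0).isSome = true := (ihseen d0).mp hs
        refine ⟨ihlen, fun d => ?_, fun j => ?_⟩
        · rw [ihseen d, lastIdx_cons_isSome]
          constructor
          · rintro (h | h) <;> [exact Or.inl h; exact Or.inr (Or.inl h)]
          · rintro (h | h | h)
            · exact Or.inl h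
            · exact Or.inr h
            · rw [hx] at h
              cases Option.some.inj h
              rcases hseen0 with h' | h'
              · exact Or.inl h'
              · exact Or.inr h'
        · rw [P_shift x xs k hk st.2 j (Or.inr ⟨d0, hx, hseen0⟩)]
          exact ihout j
      · have hmem : d0 ∉ r.2 := by
          intro hm
          exact hs ((PySem.Set.contains_iff _ _).mpr hm)
        have hstep : lwStepA r (k, x) = (PySem.List.pySetD r.1 k true, r.2.add d0) := by
          simp [lwStepA, hx, hmem]
        have hn : lastIdx xs d0 = none := by
          cases h' : lastIdx xs d0 with
          | none => rfl
          | some i =>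
            exact absurd ((ihseen d0).mpr (Or.inr (by simp [h']))) hs
        have hst0 : st.2.contains d0 = false := by
          cases h' : st.2.contains d0 with
          | false => rfl
          | true => exact absurd ((ihseen d0).mpr (Or.inl h')) hs
        have hklen : k.toNat < r.1.length := by rw [ihlen]; simp at hlen; omega
        have hset : PySem.List.pySetD r.1 k true = r.1.set k.toNat true :=
          PySem.List.pySetD_of_nonneg _ _ hk
        rw [hstep]
        refine ⟨?_, fun d => ?_, fun j => ?_⟩
        · simp [hset, ihlen]
        · have haddc : ((r.2.add d0).contains d = true) ↔ (r.2.contains d = true ∨ d = d0) := by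
            simp [PySem.Set.mem_add]
          rw [haddc, ihseen d, lastIdx_cons_isSome]
          constructor
          · rintro ((h | h) | h)
            · exact Or.inl h
            · exact Or.inr (Or.inl h)
            · exact Or.inr (Or.inr (by rw [hx, h]))
          · rintro (h | h | h)
            · exact Or.inl (Or.inl h)
            · exact Or.inl (Or.inr h)
            · rw [hx] at h; exact Or.inr (Option.some.inj h).symm
        · rw [P_shift_new x xs k hk st.2 j d0 hx hn]
          simp only [hset]
          constructor
          · rintro (h | ⟨h1, -⟩)
            · have h2 := (ihout j).1 h
              have hj : j ≠ k.toNat := by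
                obtain ⟨d, i, -, h3, -⟩ := h
                omega
              rw [List.getElem?_set_ne (by omega)]
              exact h2
            · subst h1
              rw [List.getElem?_set_self (by omega)]
          · intro h
            have h1 : ¬ ∃ d i, lastIdx xs d = some i ∧ j = (k + 1).toNat + i ∧ st.2.contains d = false :=
              fun hc => h (Or.inl hc)
            have hj : j ≠ k.toNat := fun hj => h (Or.inr ⟨hj, hst0⟩)
            rw [List.getElem?_set_ne (by omega)]
            exact (ihout j).2 h1

theorem lastIdx_spec {xs : List (List (String × String))} {d : String} {i : Nat}
    (h : lastIdx xs d = some i) : ∃ h' : i < xs.length, lwDest xs[i] = some d := by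
  induction xs generalizing i with
  | nil => simp [lastIdx] at h
  | cons x xs ih =>
    unfold lastIdx at h
    cases hx : lastIdx xs d with
    | some i' =>
      rw [hx] at h
      obtain ⟨h', hd⟩ := ih hx
      cases h
      exact ⟨by simpa using Nat.succ_lt_succ h', by simpa using hd⟩
    | none =>
      rw [hx] at h
      split_ifs at h with hd
      · cases h; exact ⟨by simp, by simpa using hd⟩

theorem lwBuild_get (xs : List (List (String × String))) (k : Int)
    (t0 : PySem.Dict String Int) (d : String) :
    ((PySem.List.enumerate xs k).foldl lwUpd t0).get? d =
      match lastIdx xs d with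
      | some i => some (k + i)
      | none => t0.get? d := by
  induction xs generalizing k t0 with
  | nil => simp [PySem.List.enumerate_nil, lastIdx]
  | cons x xs ih =>
    rw [PySem.List.enumerate_cons, List.foldl_cons, ih]
    cases hx : lastIdx xs d with
    | some i => simp [lastIdx, hx]; ring
    | none =>
      simp only [lastIdx, hx]
      by_cases hd : lwDest x = some d
      · simp [hd, lwUpd, PySem.Dict.get?_insert_self]
      · cases hx2 : lwDest x with
        | none => simp [lwUpd, hx2]
        | some d0 =>
          have : d ≠ d0 := by rintro rfl; exact hd hx2
          simp [lwUpd, hx2, PySem.Dict.get?_insert_of_ne _ _ this, this.symm]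

theorem last_writes_eq (instrs : List (List (String × String))) :
    last_writes instrs = last_writes_alt instrs := by
  apply List.ext_getElem?
  intro j
  obtain ⟨hlenA, -, hout⟩ := runA_inv instrs 0
    (List.replicate instrs.length false, (PySem.Set.empty : PySem.Set String))
    (le_refl 0) (by simp)
  by_cases hj : j < instrs.length
  · have hB : (last_writes_alt instrs)[j]? =
        some (match lwDest instrs[j] with
          | some dest =>
            ((PySem.List.enumerate instrs 0).foldl lwUpd PySem.Dict.empty).get? dest
              == some ((0 : Int) + j)
          | none => false) := by
      unfold last_writes_alt
      simp only [List.getElem?_map, PySem.List.getElem?_enumerate,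
        List.getElem?_eq_getElem hj, Option.map_some]
    have hEmpty : ∀ d : String, (PySem.Set.empty : PySem.Set String).contains d = false := by
      intro d; rfl
    have hAfalse : (¬ ∃ d i, lastIdx instrs d = some i ∧ j = (0 : Int).toNat + i ∧
        (PySem.Set.empty : PySem.Set String).contains d = false) →
        (last_writes instrs)[j]? = some false := by
      intro h
      unfold last_writes
      rw [(hout j).2 h]
      simp [hj]
    cases hd : lwDest instrs[j] with
    | none =>
      have hA := hAfalse (by
        rintro ⟨d, i, h1, h2, -⟩
        obtain ⟨h', hdd⟩ := lastIdx_spec h1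
        have hji : j = i := by omega
        subst hji
        rw [hd] at hdd; cases hdd)
      rw [hA, hB, hd]
    | some d =>
      have hTbl := lwBuild_get instrs 0 PySem.Dict.empty d
      have hkey : (∃ d' i', lastIdx instrs d' = some i' ∧ j = (0 : Int).toNat + i' ∧
          (PySem.Set.empty : PySem.Set String).contains d' = false) ↔
          lastIdx instrs d = some j := by
        constructor
        · rintro ⟨d', i', h1, h2, -⟩
          have hji : j = i' := by omega
          subst hji
          obtain ⟨h', hdd⟩ := lastIdx_spec h1
          rw [hd] at hdd
          cases Option.some.inj hdd
          exact h1
        · intro h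
          exact ⟨d, j, h, by omega, hEmpty d⟩
      by_cases hP : lastIdx instrs d = some j
      · have hA : (last_writes instrs)[j]? = some true := by
          unfold last_writes
          exact (hout j).1 (hkey.mpr hP)
        rw [hP] at hTbl
        rw [hA, hB, hd]
        simp [hTbl]
      · have hA := hAfalse (fun h => hP (hkey.mp h))
        rw [hA, hB, hd]
        cases hli : lastIdx instrs d with
        | some i =>
          rw [hli] at hTbl
          have hij : i ≠ j := fun h => hP (h ▸ hli)
          simp [hTbl, hij]
        | none =>
          rw [hli] at hTbl
          simp [hTbl, PySem.Dict.get?_empty]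
  · have h1 : (last_writes instrs)[j]? = none := by
      apply List.getElem?_eq_none
      unfold last_writes
      rw [hlenA]
      simpa using Nat.le_of_not_lt hj
    have h2 : (last_writes_alt instrs)[j]? = none := by
      apply List.getElem?_eq_none
      unfold last_writes_alt
      simpa [PySem.List.length_enumerate] using Nat.le_of_not_lt hj
    rw [h1, h2]

-- ===== VERDICT (by name: the statement is the Claim_ definition above) =====
theorem last_writes_spec : Claim_equal_last_writes := by
  intro instrs _
  unfold Spec_last_writes
  exact last_writes_eq instrs
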